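-- pv_equiv track=rewrite | github.com/andomingos87/seleto-industrial | src/services/agent_pause.py | is_resume_command
-- ===== SOURCE A (Python) =====
-- RESUME_COMMANDS = [
--     "/retomar", "/continuar",  # With slash (for WhatsApp direct commands)
--     "retomar", "continuar",    # Without slash (for Chatwoot - can't start with /)
--     "!retomar", "!continuar",  # Alternative prefix for Chatwoot
-- ]
--
-- def is_resume_command(message: str) -> bool:
--     """
--     Check if a message is a resume command (/retomar or /continuar).
--
--     Args:
--         message: Message content
--
--     Returns:
--         True if message is a resume command, False otherwise
--     """
--     if not message:
--         return False
--
--     # Normalize message for comparison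
--     normalized_message = message.strip().lower()
--
--     # Check for exact match or message starting with command
--     for command in RESUME_COMMANDS:
--         if normalized_message == command or normalized_message.startswith(command + " "):
--             return True
--
--     return False
-- ===== SOURCE B (Python) =====
-- RESUME_COMMANDS = {
--     "/retomar", "/continuar",  # With slash (for WhatsApp direct commands)
--     "retomar", "continuar",    # Without slash (for Chatwoot - can't start with /)
--     "!retomar", "!continuar",  # Alternative prefix for Chatwoot
-- }
--
--
-- def is_resume_command(message: str) -> bool:
--     if not message:
--         return False
--     # First space-delimited token of the normalized message, checked against the set.
--     return message.strip().lower().split(" ", 1)[0] in RESUME_COMMANDS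
-- ===== Notes on version B (the rewrite author's own statement) =====
-- stated objective: simpler
-- what changed: Replaces the loop over the six commands, each tested by equality or by a starts-with-command-then-space check, with a single extraction of the first space-delimited token of the normalized message followed by one set-membership lookup.
import Mathlib
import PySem

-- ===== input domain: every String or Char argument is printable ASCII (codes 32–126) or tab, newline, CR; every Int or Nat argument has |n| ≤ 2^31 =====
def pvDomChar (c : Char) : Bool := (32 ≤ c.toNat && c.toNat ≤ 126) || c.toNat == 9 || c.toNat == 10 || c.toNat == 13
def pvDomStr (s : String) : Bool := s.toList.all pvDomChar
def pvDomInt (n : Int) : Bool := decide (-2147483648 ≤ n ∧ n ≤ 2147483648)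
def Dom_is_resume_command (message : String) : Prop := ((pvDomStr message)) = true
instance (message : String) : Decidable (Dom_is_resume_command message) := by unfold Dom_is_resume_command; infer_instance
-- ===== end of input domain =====

-- B replaces A's loop over commands (each tested by == / startswith) with one first-token
-- extraction followed by a single set-membership lookup: simpler, one pass over the message.

-- ===== PORT A =====
def RESUME_COMMANDS : List String :=
  ["/retomar", "/continuar", "retomar", "continuar", "!retomar", "!continuar"]

def is_resume_command (message : String) : Bool :=
  if message == "" then false
  else
    let normalized_message := PySem.Str.lower (PySem.Str.strip message)
    -- for command in RESUME_COMMANDS: if … : return True / return False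
    RESUME_COMMANDS.any (fun command =>
      normalized_message == command
        || PySem.Str.startswith normalized_message (command ++ " "))

-- ===== PORT B =====
def RESUME_SET : PySem.Set String :=
  PySem.Set.ofList ["/retomar", "/continuar", "retomar", "continuar", "!retomar", "!continuar"]

def is_resume_command_alt (message : String) : Bool :=
  if message == "" then false
  else
    -- message.strip().lower().split(" ", 1)[0] in RESUME_COMMANDS
    match PySem.Str.splitMax? (PySem.Str.lower (PySem.Str.strip message)) " " 1 with
    | some (first :: _) => PySem.Set.contains RESUME_SET first
    | _ => false  -- unreachable: split(" ", 1) always yields at least one piece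

-- ===== PRECONDITION & SPEC =====
def Spec_is_resume_command (message : String) (out : Bool) : Prop := out = is_resume_command_alt message
instance (message : String) (out : Bool) : Decidable (Spec_is_resume_command message out) := by unfold Spec_is_resume_command; infer_instance

-- ===== CLAIM (what is proved, stated in full; the proofs are below) =====
def Claim_equal_is_resume_command : Prop := ∀ (message : String), Dom_is_resume_command message → Spec_is_resume_command message (is_resume_command message)

-- ===== LEMMAS AND PROOFS =====

-- splitOnMax.go with maxsplit budget 0 returns at once.
lemma go_zero (fuel : Nat) (l cur : List Char) (acc : List (List Char)) :
    PySem.Chars.splitOnMax.go [' '] fuel 0 l cur acc = acc.reverse ++ [cur.reverse ++ l] := by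
  cases fuel with
  | zero => simp [PySem.Chars.splitOnMax.go]
  | succ f => cases l with
    | nil => simp [PySem.Chars.splitOnMax.go]
    | cons c r => simp [PySem.Chars.splitOnMax.go]

-- splitOnMax.go on " " with budget 1: the first piece is the chars before the first space.
lemma go_one (fuel : Nat) (cs cur : List Char) (acc : List (List Char)) (h : cs.length < fuel) :
    ∃ t, PySem.Chars.splitOnMax.go [' '] fuel 1 cs cur acc
      = acc.reverse ++ ((cur.reverse ++ cs.takeWhile (· != ' ')) :: t) := by
  induction fuel generalizing cs cur acc with
  | zero => omega
  | succ f ih =>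
    cases cs with
    | nil => exact ⟨[], by simp [PySem.Chars.splitOnMax.go]⟩
    | cons c r =>
      have hpre : (List.isPrefixOf [' '] (c :: r)) = (' ' == c) := by
        simp [List.isPrefixOf]
      by_cases hc : c = ' '
      · subst hc
        refine ⟨[r], ?_⟩
        simp only [PySem.Chars.splitOnMax.go, hpre, beq_self_eq_true, if_true, if_neg Nat.one_ne_zero]
        simp [go_zero]
      · have hlen : r.length < f := by simpa using h
        obtain ⟨t, ht⟩ := ih r (c :: cur) acc hlen
        refine ⟨t, ?_⟩
        simp only [PySem.Chars.splitOnMax.go, hpre, if_neg Nat.one_ne_zero]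
        rw [if_neg (show ¬ ((' ' == c) = true) from by simp; exact fun h => hc h.symm)]
        rw [ht]
        simp [hc]

-- A space-free word equals the leading space-free segment iff the whole string is the word
-- or the word followed by a space is a prefix.
lemma tw_eq_iff (w : List Char) (hw : ' ' ∉ w) (cs : List Char) :
    cs.takeWhile (· != ' ') = w ↔ (cs = w ∨ w ++ [' '] <+: cs) := by
  induction w generalizing cs with
  | nil =>
    cases cs with
    | nil => simp
    | cons c r =>
      by_cases hc : c = ' '
      · subst hc; simp
      · simp only [List.takeWhile_cons, List.nil_append, List.cons_prefix_cons]
        simp only [hc, if_pos, bne_iff_ne, ne_eq, not_false_iff]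
        simp
        exact fun h => hc h.symm
  | cons a w' ih =>
    have ha : a ≠ ' ' := by intro h; exact hw (h ▸ List.mem_cons_self)
    have hw' : ' ' ∉ w' := fun h => hw (List.mem_cons_of_mem _ h)
    cases cs with
    | nil => simp
    | cons c r =>
      by_cases hc : c = ' '
      · subst hc
        simp only [List.takeWhile_cons, List.cons_append, List.cons_prefix_cons]
        simp [fun h : a = ' ' => ha h]
        exact fun h => absurd h.symm ha
      · simp only [List.takeWhile_cons, hc, bne_iff_ne, ne_eq, not_false_iff, if_pos,
          List.cons.injEq, List.cons_append, List.cons_prefix_cons]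
        rw [ih hw' r]
        constructor
        · rintro ⟨rfl, h | h⟩
          · exact Or.inl ⟨rfl, h⟩
          · exact Or.inr ⟨rfl, h⟩
        · rintro (⟨rfl, h⟩ | ⟨rfl, h⟩)
          · exact ⟨rfl, Or.inl h⟩
          · exact ⟨rfl, Or.inr h⟩

-- A's per-command double test equals "first token is that command", for space-free commands.
lemma cmd_eq (n w : String) (hw : ' ' ∉ w.toList) :
    (n == w || PySem.Str.startswith n (w ++ " "))
      = (String.ofList (n.toList.takeWhile (· != ' ')) == w) := by
  rw [Bool.eq_iff_iff]
  simp only [Bool.or_eq_true, beq_iff_eq, PySem.Str.startswith_eq, PySem.Chars.startswith_iff]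
  constructor
  · rintro (rfl | h)
    · exact String.ext (by rw [String.toList_ofList]
                           exact (tw_eq_iff n.toList hw n.toList).mpr (Or.inl rfl))
    · refine String.ext ?_
      rw [String.toList_ofList]
      refine (tw_eq_iff w.toList hw n.toList).mpr (Or.inr ?_)
      simpa using h
  · intro h
    have h' : n.toList.takeWhile (· != ' ') = w.toList := by
      have := congrArg String.toList h
      simpa [String.toList_ofList] using this
    rcases (tw_eq_iff w.toList hw n.toList).mp h' with h1 | h1
    · exact Or.inl (String.ext h1)
    · right
      simpa using h1

-- B's split(" ", 1)[0] is the leading space-free segment of the normalized message.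
lemma split_first (n : String) :
    ∃ t, PySem.Str.splitMax? n " " 1
      = some (String.ofList (n.toList.takeWhile (· != ' ')) :: t) := by
  obtain ⟨t, ht⟩ := go_one (n.toList.length + 1) n.toList [] [] (Nat.lt_succ_self _)
  refine ⟨t.map String.ofList, ?_⟩
  simp only [PySem.Str.splitMax?, PySem.Chars.splitMax?, PySem.Chars.splitOnMax]
  rw [if_neg (by decide), if_neg (by decide)]
  have hsep : (" " : String).toList = [' '] := by decide
  rw [show Int.toNat 1 = 1 from rfl, hsep, ht]
  simp

-- ===== VERDICT (by name: the statement is the Claim_ definition above) =====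
lemma contains_RESUME (x : String) :
    PySem.Set.contains RESUME_SET x = RESUME_COMMANDS.any (x == ·) := by
  show List.contains RESUME_SET x = _
  rw [show (RESUME_SET : List String) = RESUME_COMMANDS from by decide,
      List.contains_eq_any_beq]

theorem is_resume_command_spec : Claim_equal_is_resume_command := by
  intro message _
  unfold Spec_is_resume_command
  by_cases h0 : (message == "") = true
  · simp [is_resume_command, is_resume_command_alt, h0]
  · obtain ⟨t, ht⟩ := split_first (PySem.Str.lower (PySem.Str.strip message))
    simp only [is_resume_command, is_resume_command_alt, h0, Bool.false_eq_true, if_false, ht]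
    rw [contains_RESUME]
    refine PySem.List.any_congr_mem (fun c hc => ?_)
    have hw : ' ' ∉ c.toList := by
      fin_cases hc <;> decide
    exact cmd_eq _ c hw
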